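-- pv_equiv track=rewrite | github.com/Mimijackz/Advent-of-code-2023 | 7/7-2.py | CardsToNumber
-- ===== SOURCE A (Python) =====
-- def CardsToNumber(cards):
--     key = "J23456789TQKA"
--     translator = {}
--     for i in range(len(key)):
--         translator[key[i]] = i
--     reversecards = cards[::-1]
--     base = len(key)
--     value = 0
--     for i in range(len(reversecards)):
--         value += pow(base, i + 1) * translator[reversecards[i]]
--     return value
-- ===== SOURCE B (Python) =====
-- def CardsToNumber(cards):
--     key = "J23456789TQKA"
--     translator = {c: i for i, c in enumerate(key)}
--     value = 0
--     for c in cards: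
--         value = value * 13 + translator[c]
--     return 13 * value
-- ===== Notes on version B (the rewrite author's own statement) =====
-- stated objective: simpler
-- what changed: Replaces A's reverse-the-string-and-sum-explicit-powers loop (pow(13, i+1) per digit) with a forward Horner multiply-accumulate pass, multiplying once by 13 at the end to reproduce A's extra power shift.
import Mathlib
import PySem

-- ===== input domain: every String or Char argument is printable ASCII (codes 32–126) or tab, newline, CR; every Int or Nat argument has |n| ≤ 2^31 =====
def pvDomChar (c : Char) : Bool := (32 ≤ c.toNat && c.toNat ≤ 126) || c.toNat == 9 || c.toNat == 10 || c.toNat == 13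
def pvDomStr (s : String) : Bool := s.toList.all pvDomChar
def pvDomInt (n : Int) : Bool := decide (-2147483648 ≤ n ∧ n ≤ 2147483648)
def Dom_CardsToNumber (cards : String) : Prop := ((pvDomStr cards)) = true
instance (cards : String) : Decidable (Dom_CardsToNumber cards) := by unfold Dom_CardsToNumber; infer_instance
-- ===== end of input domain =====

-- B changes A's reversed-scan-with-explicit-powers into a forward Horner pass (simpler; same cost).
-- ===== PORT A =====
-- 'for i in range(len(key)): translator[key[i]] = i'; key[i] is always in range, the getD 'J' only makes it total
def CardsToNumber (cards : String) : Int :=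
  let key : String := "J23456789TQKA"
  let translator : PySem.Dict Char Int :=
    (PySem.List.pyRange 0 (PySem.Str.len key) 1).foldl
      (fun d i => d.insert ((PySem.Str.pyGet? key i).getD 'J') i) PySem.Dict.empty
  let reversecards : String := (PySem.Str.slice? cards none none (-1)).getD ""
  let base : Int := PySem.Str.len key
  -- translator[reversecards[i]]: a missing key is a KeyError, excluded by Pre_; getD only makes it total
  (PySem.List.pyRange 0 (PySem.Str.len reversecards) 1).foldl
    (fun value i =>
      value + base ^ (i + 1).toNat * translator.getD ((PySem.Str.pyGet? reversecards i).getD 'J') 0)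
    0

-- ===== PORT B =====
def CardsToNumber_alt (cards : String) : Int :=
  let key : String := "J23456789TQKA"
  let translator : PySem.Dict Char Int :=
    (PySem.List.enumerate key.toList 0).foldl (fun d p => d.insert p.2 p.1) PySem.Dict.empty
  13 * cards.toList.foldl (fun value c => value * 13 + translator.getD c 0) 0

-- ===== PRECONDITION & SPEC =====
-- Pre_ excludes exactly the strings with a character outside the 13-card alphabet, on which Python A raises KeyError.
def Pre_CardsToNumber (cards : String) : Prop :=
  cards.toList.all (fun c => ("J23456789TQKA".toList).contains c) = true
instance (cards : String) : Decidable (Pre_CardsToNumber cards) := by unfold Pre_CardsToNumber; infer_instance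
def pvWitness_CardsToNumber : String := "T55J5"
def Spec_CardsToNumber (cards : String) (out : Int) : Prop := out = CardsToNumber_alt cards
instance (cards : String) (out : Int) : Decidable (Spec_CardsToNumber cards out) := by unfold Spec_CardsToNumber; infer_instance

-- ===== CLAIM (what is proved, stated in full; the proofs are below) =====
def Claim_equal_CardsToNumber : Prop := ∀ (cards : String), Dom_CardsToNumber cards → Pre_CardsToNumber cards → Spec_CardsToNumber cards (CardsToNumber cards)

-- ===== LEMMAS AND PROOFS =====

-- the common translation of a card character, with default 0 (both ports' dicts coincide)
def pvT (c : Char) : Int :=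
  ((PySem.List.enumerate ("J23456789TQKA".toList) 0).foldl
    (fun d p => d.insert p.2 p.1) PySem.Dict.empty).getD c 0

-- little-endian polynomial value: head is the least significant digit
def pvPoly : List Char → Int
  | [] => 0
  | c :: r => pvT c + 13 * pvPoly r

theorem pvPoly_horner (l : List Char) :
    l.foldl (fun value c => value * 13 + pvT c) 0 = pvPoly l.reverse := by
  induction l using List.reverseRecOn with
  | nil => rfl
  | append_singleton xs c ih =>
      simp [List.foldl_append, pvPoly, ih]
      ring

theorem pvSum_eq (l : List Char) :
    ((List.range l.length).map (fun k => (13:Int) ^ (k + 1) * pvT (l.getD k 'J'))).sum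
      = 13 * pvPoly l := by
  induction l with
  | nil => simp [pvPoly]
  | cons c r ih =>
      rw [show (c :: r).length = r.length + 1 from rfl, List.range_succ_eq_map]
      simp only [List.map_cons, List.map_map, List.sum_cons]
      have : ((List.range r.length).map
          (fun k => (13:Int) ^ (k + 1) * pvT (r.getD k 'J'))).sum = 13 * pvPoly r := ih
      have h2 : ((List.range r.length).map
            ((fun k => (13:Int) ^ (k + 1) * pvT ((c :: r).getD k 'J')) ∘ (fun i => i + 1))).sum
          = 13 * ((List.range r.length).map
            (fun k => (13:Int) ^ (k + 1) * pvT (r.getD k 'J'))).sum := by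
        rw [← List.sum_map_mul_left]
        congr 1
        apply List.map_congr_left
        intro k _
        simp [Function.comp, List.getD]
        ring
      rw [h2, this, pvPoly]
      simp [List.getD]
      ring

theorem loopA_eq (s : String) :
    List.foldl
      (fun value i => value + (13:Int) ^ (i + 1).toNat * pvT ((PySem.Str.pyGet? s i).getD 'J'))
      0 (PySem.List.pyRange 0 (PySem.Str.len s) 1)
    = 13 * pvPoly s.toList := by
  rw [PySem.List.foldl_add, PySem.List.pyRange_one, ← pvSum_eq s.toList]
  simp only [List.map_map, zero_add]
  have hlen : ((PySem.Str.len s) - 0).toNat = s.toList.length := by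
    simp [PySem.Str.len_eq]
  rw [hlen]
  congr 1
  apply List.map_congr_left
  intro k hk
  simp [Function.comp, List.getD]

theorem pvDictEq :
    (PySem.List.pyRange 0 (PySem.Str.len "J23456789TQKA") 1).foldl
      (fun d i => d.insert ((PySem.Str.pyGet? "J23456789TQKA" i).getD 'J') i) PySem.Dict.empty
    = (PySem.List.enumerate ("J23456789TQKA".toList) 0).foldl
      (fun d p => d.insert p.2 p.1) PySem.Dict.empty := by decide

-- ===== VERDICT (by name: the statement is the Claim_ definition above) =====
theorem CardsToNumber_spec : Claim_equal_CardsToNumber := by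
  intro cards _ _
  unfold Spec_CardsToNumber CardsToNumber CardsToNumber_alt
  simp only [PySem.Str.slice?_none_none_neg_one, Option.getD_some]
  rw [pvDictEq]
  rw [show PySem.Str.len "J23456789TQKA" = 13 from by decide]
  have h1 := loopA_eq (String.ofList cards.toList.reverse)
  have h2 := pvPoly_horner cards.toList
  simp only [pvT] at h1 h2
  rw [h1, show (String.ofList cards.toList.reverse).toList = cards.toList.reverse from by simp, h2]
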